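-- pv_equiv track=rewrite | github.com/chuuuul/influence_item | dashboard/utils/image_similarity.py | _guess_category_from_url
-- ===== SOURCE A (Python) =====
-- def _guess_category_from_url(url: str) -> str:
--     """
--     URL에서 카테고리 추측
--     """
--     url_lower = url.lower()
--
--     # 쇼핑몰별 패턴
--     if 'coupang' in url_lower:
--         return 'coupang_product'
--     elif 'naver' in url_lower and 'shopping' in url_lower:
--         return 'naver_shopping'
--     elif '11st' in url_lower:
--         return 'elevenst_product'
--     elif 'amazon' in url_lower:
--         return 'amazon_product'
--
--     # 카테고리 키워드
--     beauty_keywords = ['beauty', 'cosmetic', 'makeup', 'skincare']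
--     fashion_keywords = ['fashion', 'clothing', 'shoes', 'bag']
--     tech_keywords = ['tech', 'electronics', 'phone', 'computer']
--
--     for keyword in beauty_keywords:
--         if keyword in url_lower:
--             return 'beauty'
--
--     for keyword in fashion_keywords:
--         if keyword in url_lower:
--             return 'fashion'
--
--     for keyword in tech_keywords:
--         if keyword in url_lower:
--             return 'tech'
--
--     return 'general'
-- ===== SOURCE B (Python) =====
-- _KEYWORDS = ['coupang', 'naver', 'shopping', '11st', 'amazon',
--              'beauty', 'cosmetic', 'makeup', 'skincare',
--              'fashion', 'clothing', 'shoes', 'bag',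
--              'tech', 'electronics', 'phone', 'computer']
--
-- _BEAUTY = ['beauty', 'cosmetic', 'makeup', 'skincare']
-- _FASHION = ['fashion', 'clothing', 'shoes', 'bag']
-- _TECH = ['tech', 'electronics', 'phone', 'computer']
--
--
-- def _guess_category_from_url(url: str) -> str:
--     u = url.lower()
--     # Single sweep over the url: at each position record every keyword starting there.
--     hits = set()
--     for i in range(len(u)):
--         for kw in _KEYWORDS:
--             if u.startswith(kw, i):
--                 hits.add(kw)
--     # Resolve the collected hit set by priority.
--     if 'coupang' in hits:
--         return 'coupang_product'
--     if 'naver' in hits and 'shopping' in hits: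
--         return 'naver_shopping'
--     if '11st' in hits:
--         return 'elevenst_product'
--     if 'amazon' in hits:
--         return 'amazon_product'
--     if any(k in hits for k in _BEAUTY):
--         return 'beauty'
--     if any(k in hits for k in _FASHION):
--         return 'fashion'
--     if any(k in hits for k in _TECH):
--         return 'tech'
--     return 'general'
-- ===== Notes on version B (the rewrite author's own statement) =====
-- stated objective: alternative
-- what changed: Instead of running a separate substring search per keyword, B makes one sweep over the lowercased url, collecting at each position every keyword that starts there into a hit set, and then resolves that set by priority.
import Mathlib
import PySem

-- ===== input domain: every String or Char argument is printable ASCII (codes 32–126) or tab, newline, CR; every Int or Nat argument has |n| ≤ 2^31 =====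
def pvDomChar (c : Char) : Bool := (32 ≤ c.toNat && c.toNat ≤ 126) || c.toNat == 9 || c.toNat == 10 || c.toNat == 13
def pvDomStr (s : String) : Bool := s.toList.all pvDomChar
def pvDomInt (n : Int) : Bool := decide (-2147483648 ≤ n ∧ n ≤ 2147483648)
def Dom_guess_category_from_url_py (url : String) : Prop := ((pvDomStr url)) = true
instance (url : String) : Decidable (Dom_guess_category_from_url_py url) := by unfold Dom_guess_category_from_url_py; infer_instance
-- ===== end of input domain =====

-- B replaces A's per-keyword substring searches by one sweep over the lowercased url
-- collecting a hit set of keywords, then resolves the set by priority (alternative; same cost).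

-- ===== PORT A =====
def guess_category_from_url_py (url : String) : String :=
  let url_lower := PySem.Str.lower url
  if PySem.Str.isIn "coupang" url_lower then "coupang_product"
  else if PySem.Str.isIn "naver" url_lower && PySem.Str.isIn "shopping" url_lower then "naver_shopping"
  else if PySem.Str.isIn "11st" url_lower then "elevenst_product"
  else if PySem.Str.isIn "amazon" url_lower then "amazon_product"
  else
    let beauty_keywords := ["beauty", "cosmetic", "makeup", "skincare"]
    let fashion_keywords := ["fashion", "clothing", "shoes", "bag"]
    let tech_keywords := ["tech", "electronics", "phone", "computer"]
    if beauty_keywords.any (fun k => PySem.Str.isIn k url_lower) then "beauty"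
    else if fashion_keywords.any (fun k => PySem.Str.isIn k url_lower) then "fashion"
    else if tech_keywords.any (fun k => PySem.Str.isIn k url_lower) then "tech"
    else "general"

-- ===== PORT B =====
def pvKeywords : List (List Char) :=
  ["coupang".toList, "naver".toList, "shopping".toList, "11st".toList, "amazon".toList,
   "beauty".toList, "cosmetic".toList, "makeup".toList, "skincare".toList,
   "fashion".toList, "clothing".toList, "shoes".toList, "bag".toList,
   "tech".toList, "electronics".toList, "phone".toList, "computer".toList]

def pvBeauty : List (List Char) := ["beauty".toList, "cosmetic".toList, "makeup".toList, "skincare".toList]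
def pvFashion : List (List Char) := ["fashion".toList, "clothing".toList, "shoes".toList, "bag".toList]
def pvTech : List (List Char) := ["tech".toList, "electronics".toList, "phone".toList, "computer".toList]

-- one sweep: 'u.startswith(kw, i)' is Chars.startswith on the i-th suffix (exact)
def pvHits (u : List Char) : PySem.Set (List Char) :=
  (List.range u.length).foldl
    (fun acc i =>
      pvKeywords.foldl
        (fun acc kw => if PySem.Chars.startswith (u.drop i) kw then PySem.Set.add acc kw else acc)
        acc)
    PySem.Set.empty

def guess_category_from_url_py_alt (url : String) : String :=
  let u := PySem.Chars.lower url.toList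
  let hits := pvHits u
  if PySem.Set.contains hits "coupang".toList then "coupang_product"
  else if PySem.Set.contains hits "naver".toList && PySem.Set.contains hits "shopping".toList then "naver_shopping"
  else if PySem.Set.contains hits "11st".toList then "elevenst_product"
  else if PySem.Set.contains hits "amazon".toList then "amazon_product"
  else if pvBeauty.any (fun k => PySem.Set.contains hits k) then "beauty"
  else if pvFashion.any (fun k => PySem.Set.contains hits k) then "fashion"
  else if pvTech.any (fun k => PySem.Set.contains hits k) then "tech"
  else "general"

-- ===== PRECONDITION & SPEC =====
def Spec_guess_category_from_url_py (url : String) (out : String) : Prop := out = guess_category_from_url_py_alt url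
instance (url : String) (out : String) : Decidable (Spec_guess_category_from_url_py url out) := by unfold Spec_guess_category_from_url_py; infer_instance

-- ===== CLAIM (what is proved, stated in full; the proofs are below) =====
def Claim_equal_guess_category_from_url_py : Prop := ∀ (url : String), Dom_guess_category_from_url_py url → Spec_guess_category_from_url_py url (guess_category_from_url_py url)

-- ===== LEMMAS AND PROOFS =====

theorem pv_mem_inner (u : List Char) (i : Nat) (kw : List Char)
    (kws : List (List Char)) (acc : PySem.Set (List Char)) :
    kw ∈ kws.foldl
      (fun acc kw => if PySem.Chars.startswith (u.drop i) kw then PySem.Set.add acc kw else acc) acc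
    ↔ kw ∈ acc ∨ (kw ∈ kws ∧ PySem.Chars.startswith (u.drop i) kw = true) := by
  induction kws generalizing acc with
  | nil => simp
  | cons k rest ih =>
    simp only [List.foldl_cons, ih, List.mem_cons]
    split
    · next h =>
      simp only [PySem.Set.mem_add]
      constructor
      · rintro ((h1 | rfl) | h2)
        · exact Or.inl h1
        · exact Or.inr ⟨Or.inl rfl, h⟩
        · exact Or.inr ⟨Or.inr h2.1, h2.2⟩
      · rintro (h1 | ⟨rfl | hk, hs⟩)
        · exact Or.inl (Or.inl h1)
        · exact Or.inl (Or.inr rfl)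
        · exact Or.inr ⟨hk, hs⟩
    · next h =>
      constructor
      · rintro (h1 | h2)
        · exact Or.inl h1
        · exact Or.inr ⟨Or.inr h2.1, h2.2⟩
      · rintro (h1 | ⟨rfl | hk, hs⟩)
        · exact Or.inl h1
        · exact absurd hs h
        · exact Or.inr ⟨hk, hs⟩

theorem pv_mem_hits (u : List Char) (kw : List Char) :
    kw ∈ pvHits u ↔ kw ∈ pvKeywords ∧ ∃ i < u.length, PySem.Chars.startswith (u.drop i) kw = true := by
  unfold pvHits
  have gen : ∀ (is : List Nat) (acc : PySem.Set (List Char)),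
      kw ∈ is.foldl (fun acc i => pvKeywords.foldl
        (fun acc kw => if PySem.Chars.startswith (u.drop i) kw then PySem.Set.add acc kw else acc) acc) acc
      ↔ kw ∈ acc ∨ (kw ∈ pvKeywords ∧ ∃ i ∈ is, PySem.Chars.startswith (u.drop i) kw = true) := by
    intro is
    induction is with
    | nil => simp
    | cons j rest ih =>
      intro acc
      simp only [List.foldl_cons, ih, pv_mem_inner, List.mem_cons]
      constructor
      · rintro ((h | ⟨hk, hs⟩) | ⟨hk, i, hi, hs⟩)
        · tauto
        · exact Or.inr ⟨hk, j, Or.inl rfl, hs⟩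
        · exact Or.inr ⟨hk, i, Or.inr hi, hs⟩
      · rintro (h | ⟨hk, i, (rfl | hi), hs⟩)
        · tauto
        · tauto
        · exact Or.inr ⟨hk, i, hi, hs⟩
  rw [gen]
  simp [PySem.Set.empty, List.mem_range]

theorem pv_hits_iff_isIn (u : List Char) (kw : List Char)
    (hk : kw ∈ pvKeywords) (hne : kw ≠ []) :
    PySem.Set.contains (pvHits u) kw = PySem.Chars.isIn kw u := by
  rw [Bool.eq_iff_iff, PySem.Set.contains_iff, pv_mem_hits]
  constructor
  · rintro ⟨-, i, hi, hs⟩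
    rw [PySem.Chars.startswith_iff] at hs
    exact (PySem.Chars.exists_prefix_drop_iff_isIn kw u).1 ⟨i, hs⟩
  · intro h
    refine ⟨hk, ?_⟩
    obtain ⟨j, hj⟩ := (PySem.Chars.exists_prefix_drop_iff_isIn kw u).2 h
    by_cases hlt : j < u.length
    · exact ⟨j, hlt, (PySem.Chars.startswith_iff _ _).2 hj⟩
    · exfalso
      rw [List.drop_eq_nil_of_le (Nat.le_of_not_lt hlt)] at hj
      exact hne (List.prefix_nil.mp hj)

-- ===== VERDICT (by name: the statement is the Claim_ definition above) =====
theorem guess_category_from_url_py_spec : Claim_equal_guess_category_from_url_py := by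
  intro url _
  unfold Spec_guess_category_from_url_py guess_category_from_url_py guess_category_from_url_py_alt
  have hw : ∀ kw : List Char, kw ∈ pvKeywords → kw ≠ [] →
      PySem.Set.contains (pvHits (PySem.Chars.lower url.toList)) kw
        = PySem.Chars.isIn kw (PySem.Chars.lower url.toList) :=
    fun kw h1 h2 => pv_hits_iff_isIn _ kw h1 h2
  simp only [pvBeauty, pvFashion, pvTech, List.any_cons, List.any_nil]
  simp only [hw "coupang".toList (by decide) (by decide),
      hw "naver".toList (by decide) (by decide),
      hw "shopping".toList (by decide) (by decide),
      hw "11st".toList (by decide) (by decide),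
      hw "amazon".toList (by decide) (by decide),
      hw "beauty".toList (by decide) (by decide),
      hw "cosmetic".toList (by decide) (by decide),
      hw "makeup".toList (by decide) (by decide),
      hw "skincare".toList (by decide) (by decide),
      hw "fashion".toList (by decide) (by decide),
      hw "clothing".toList (by decide) (by decide),
      hw "shoes".toList (by decide) (by decide),
      hw "bag".toList (by decide) (by decide),
      hw "tech".toList (by decide) (by decide),
      hw "electronics".toList (by decide) (by decide),
      hw "phone".toList (by decide) (by decide),
      hw "computer".toList (by decide) (by decide)]
  simp
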